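-- pv_equiv track=rewrite | github.com/yujeong-world/cuk_ai_team_project | utils.py | check_stench
-- ===== SOURCE A (Python) =====
-- def check_stench(agent_pos, wumpusLocation):
--     x, y = agent_pos
--     adjacent_positions = [(x-1, y), (x+1, y), (x, y-1), (x, y+1)]
--     for pos in adjacent_positions:
--         if 0 <= pos[0] < 4 and 0 <= pos[1] < 4:
--             if wumpusLocation[pos[0] * 4 + pos[1]]:
--                 return True
--     return False
-- ===== SOURCE B (Python) =====
-- def check_stench(agent_pos, wumpusLocation):
--     x, y = agent_pos
--     for i, w in enumerate(wumpusLocation[:16]):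
--         if w and abs(i // 4 - x) + abs(i % 4 - y) == 1:
--             return True
--     return False
-- ===== Notes on version B (the rewrite author's own statement) =====
-- stated objective: alternative
-- what changed: B scans the occupancy list once (first 16 cells) and tests Manhattan distance 1 via divmod, instead of probing four fixed neighbour cells with bounds checks.
-- outside the precondition, e.g. on check_stench((1, 0), [True]): A returns True, B returns True
import Mathlib
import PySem

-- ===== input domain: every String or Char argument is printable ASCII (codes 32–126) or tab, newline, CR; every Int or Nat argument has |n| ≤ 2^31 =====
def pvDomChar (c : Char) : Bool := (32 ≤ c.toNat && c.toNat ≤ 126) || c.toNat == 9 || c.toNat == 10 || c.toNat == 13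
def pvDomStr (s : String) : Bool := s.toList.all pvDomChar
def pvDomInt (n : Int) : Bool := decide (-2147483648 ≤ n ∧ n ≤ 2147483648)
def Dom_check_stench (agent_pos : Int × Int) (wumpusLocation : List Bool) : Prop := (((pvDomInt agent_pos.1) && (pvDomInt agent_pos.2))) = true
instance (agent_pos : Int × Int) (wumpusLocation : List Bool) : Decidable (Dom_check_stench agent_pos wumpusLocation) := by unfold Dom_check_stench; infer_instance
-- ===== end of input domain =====

-- B replaces A's four fixed neighbour probes by one scan of the first 16 cells testing Manhattan distance 1 (alternative decomposition, same cost).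


-- ===== PORT A =====
def csLoop (wl : List Bool) : List (Int × Int) → Bool
  | [] => false
  | p :: rest =>
    if 0 ≤ p.1 ∧ p.1 < 4 ∧ 0 ≤ p.2 ∧ p.2 < 4 then
      match PySem.List.pyGet? wl (p.1 * 4 + p.2) with
      | none => false            -- IndexError: excluded by Pre_check_stench
      | some w => if w then true else csLoop wl rest
    else csLoop wl rest

def check_stench (agent_pos : Int × Int) (wumpusLocation : List Bool) : Bool :=
  csLoop wumpusLocation
    [(agent_pos.1 - 1, agent_pos.2), (agent_pos.1 + 1, agent_pos.2),
     (agent_pos.1, agent_pos.2 - 1), (agent_pos.1, agent_pos.2 + 1)]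

-- ===== PORT B =====
def altLoop (x y : Int) : Int → List Bool → Bool
  | _, [] => false
  | i, w :: rest =>
    if w && ((PySem.Int.floordiv i 4 - x).natAbs + (PySem.Int.mod i 4 - y).natAbs == 1) then
      true
    else altLoop x y (i + 1) rest

def check_stench_alt (agent_pos : Int × Int) (wumpusLocation : List Bool) : Bool :=
  altLoop agent_pos.1 agent_pos.2 0 (PySem.List.slice wumpusLocation none (some 16))

-- ===== PRECONDITION & SPEC =====
-- Pre_ requires the flat index of every in-grid neighbour of the agent to lie within the list: on excluded
-- (short) lists A's neighbour probe generally raises IndexError (A can still return True from an earlier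
-- in-range hit, and B agrees there).
def Pre_check_stench (agent_pos : Int × Int) (wumpusLocation : List Bool) : Prop :=
  ((0 ≤ agent_pos.1 - 1 ∧ agent_pos.1 - 1 < 4 ∧ 0 ≤ agent_pos.2 ∧ agent_pos.2 < 4) →
    ((agent_pos.1 - 1) * 4 + agent_pos.2).toNat < wumpusLocation.length) ∧
  ((0 ≤ agent_pos.1 + 1 ∧ agent_pos.1 + 1 < 4 ∧ 0 ≤ agent_pos.2 ∧ agent_pos.2 < 4) →
    ((agent_pos.1 + 1) * 4 + agent_pos.2).toNat < wumpusLocation.length) ∧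
  ((0 ≤ agent_pos.1 ∧ agent_pos.1 < 4 ∧ 0 ≤ agent_pos.2 - 1 ∧ agent_pos.2 - 1 < 4) →
    (agent_pos.1 * 4 + (agent_pos.2 - 1)).toNat < wumpusLocation.length) ∧
  ((0 ≤ agent_pos.1 ∧ agent_pos.1 < 4 ∧ 0 ≤ agent_pos.2 + 1 ∧ agent_pos.2 + 1 < 4) →
    (agent_pos.1 * 4 + (agent_pos.2 + 1)).toNat < wumpusLocation.length)
instance (agent_pos : Int × Int) (wumpusLocation : List Bool) : Decidable (Pre_check_stench agent_pos wumpusLocation) := by unfold Pre_check_stench; infer_instance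

def pvWitness_check_stench : (Int × Int) × List Bool :=
  ((0, 0), [false, false, false, false, true, false, false, false, false, false, false, false, false, false, false, false])

def Spec_check_stench (agent_pos : Int × Int) (wumpusLocation : List Bool) (out : Bool) : Prop := out = check_stench_alt agent_pos wumpusLocation
instance (agent_pos : Int × Int) (wumpusLocation : List Bool) (out : Bool) : Decidable (Spec_check_stench agent_pos wumpusLocation out) := by unfold Spec_check_stench; infer_instance

-- ===== CLAIM (what is proved, stated in full; the proofs are below) =====
def Claim_equal_check_stench : Prop := ∀ (agent_pos : Int × Int) (wumpusLocation : List Bool), Dom_check_stench agent_pos wumpusLocation → Pre_check_stench agent_pos wumpusLocation → Spec_check_stench agent_pos wumpusLocation (check_stench agent_pos wumpusLocation)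

-- ===== LEMMAS AND PROOFS =====

-- A's loop, characterised when the list covers the whole grid.
theorem csLoop_iff (wl : List Bool) (ps : List (Int × Int))
    (h : ∀ p ∈ ps, (0 ≤ p.1 ∧ p.1 < 4 ∧ 0 ≤ p.2 ∧ p.2 < 4) → (p.1 * 4 + p.2).toNat < wl.length) :
    csLoop wl ps = true ↔
      ∃ p ∈ ps, (0 ≤ p.1 ∧ p.1 < 4 ∧ 0 ≤ p.2 ∧ p.2 < 4) ∧
        wl.getD (p.1 * 4 + p.2).toNat false = true := by
  induction ps with
  | nil => simp [csLoop]
  | cons p rest ih =>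
    have hrest : ∀ q ∈ rest, (0 ≤ q.1 ∧ q.1 < 4 ∧ 0 ≤ q.2 ∧ q.2 < 4) →
        (q.1 * 4 + q.2).toNat < wl.length :=
      fun q hq => h q (List.mem_cons_of_mem p hq)
    by_cases hg : 0 ≤ p.1 ∧ p.1 < 4 ∧ 0 ≤ p.2 ∧ p.2 < 4
    · have hnn : 0 ≤ p.1 * 4 + p.2 := by omega
      have hlt' : (p.1 * 4 + p.2).toNat < wl.length := h p List.mem_cons_self hg
      have hget : PySem.List.pyGet? wl (p.1 * 4 + p.2) = some wl[(p.1 * 4 + p.2).toNat] := by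
        rw [PySem.List.pyGet?_of_nonneg (xs := wl) (i := p.1 * 4 + p.2) hnn]
        exact List.getElem?_eq_getElem hlt'
      have hgd : wl.getD (p.1 * 4 + p.2).toNat false = wl[(p.1 * 4 + p.2).toNat] :=
        List.getD_eq_getElem wl false hlt'
      rw [csLoop, if_pos hg, hget]
      dsimp only
      by_cases hw : wl[(p.1 * 4 + p.2).toNat] = true
      · rw [if_pos hw]
        constructor
        · intro _
          exact ⟨p, List.mem_cons_self, hg, by rw [hgd]; exact hw⟩
        · intro _; rfl
      · have hwf : wl[(p.1 * 4 + p.2).toNat] = false := by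
          cases h : wl[(p.1 * 4 + p.2).toNat]
          · rfl
          · exact absurd h hw
        rw [hwf, if_neg Bool.false_ne_true, ih hrest]
        constructor
        · rintro ⟨q, hq, hgq, hvq⟩
          exact ⟨q, List.mem_cons_of_mem p hq, hgq, hvq⟩
        · rintro ⟨q, hq, hgq, hvq⟩
          rcases List.mem_cons.mp hq with rfl | hq
          · exact absurd (hgd ▸ hvq) hw
          · exact ⟨q, hq, hgq, hvq⟩
    · rw [csLoop, if_neg hg, ih hrest]
      constructor
      · rintro ⟨q, hq, hgq, hvq⟩
        exact ⟨q, List.mem_cons_of_mem p hq, hgq, hvq⟩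
      · rintro ⟨q, hq, hgq, hvq⟩
        rcases List.mem_cons.mp hq with rfl | hq
        · exact absurd hgq hg
        · exact ⟨q, hq, hgq, hvq⟩

-- B's loop, characterised for any start index.
theorem altLoop_iff (x y : Int) (L : List Bool) : ∀ (i : Nat),
    altLoop x y (i : Int) L = true ↔
      ∃ j : Nat, j < L.length ∧ L.getD j false = true ∧
        ((((i + j) / 4 : Nat) : Int) - x).natAbs + ((((i + j) % 4 : Nat) : Int) - y).natAbs = 1 := by
  induction L with
  | nil => intro i; simp [altLoop]
  | cons w rest ih =>
    intro i
    have hcast : (i : Int) + 1 = ((i + 1 : Nat) : Int) := by push_cast; ring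
    have hdiv : PySem.Int.floordiv (i : Int) 4 = ((i / 4 : Nat) : Int) := by
      exact_mod_cast PySem.Int.floordiv_natCast i 4
    have hmod : PySem.Int.mod (i : Int) 4 = ((i % 4 : Nat) : Int) := by
      exact_mod_cast PySem.Int.mod_natCast i 4
    by_cases hw : w = true ∧
        (((i / 4 : Nat) : Int) - x).natAbs + (((i % 4 : Nat) : Int) - y).natAbs = 1
    · rw [altLoop, hdiv, hmod,
        if_pos (by simp only [hw.1, Bool.true_and, beq_iff_eq]; exact hw.2)]
      constructor
      · intro _
        exact ⟨0, by simp, by simpa using hw.1, by simpa using hw.2⟩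
      · intro _; rfl
    · rw [altLoop, hdiv, hmod,
        if_neg (by simp only [Bool.and_eq_true, beq_iff_eq]; exact fun h => hw ⟨h.1, h.2⟩),
        hcast, ih (i + 1)]
      constructor
      · rintro ⟨j, hj, hval, hdist⟩
        refine ⟨j + 1, by simpa using hj, by simpa using hval, ?_⟩
        have heq : i + 1 + j = i + (j + 1) := by omega
        rwa [heq] at hdist
      · rintro ⟨j, hj, hval, hdist⟩
        match j with
        | 0 =>
          exact absurd ⟨by simpa using hval, by simpa using hdist⟩ hw
        | j + 1 =>
          refine ⟨j, by simpa using hj, by simpa using hval, ?_⟩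
          have heq : i + (j + 1) = i + 1 + j := by omega
          rwa [heq] at hdist

theorem slice16 (wl : List Bool) : PySem.List.slice wl none (some 16) = wl.take 16 := by
  have := PySem.List.slice_to_natCast wl 16
  simpa using this

theorem check_stench_spec' (agent_pos : Int × Int) (wumpusLocation : List Bool)
    (hpre : Pre_check_stench agent_pos wumpusLocation) :
    check_stench agent_pos wumpusLocation = check_stench_alt agent_pos wumpusLocation := by
  obtain ⟨x, y⟩ := agent_pos
  obtain ⟨hp1, hp2, hp3, hp4⟩ := hpre
  set wl := wumpusLocation with hwl
  have hB : check_stench_alt (x, y) wl = altLoop x y ((0 : Nat) : Int) (wl.take 16) := by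
    simp [check_stench_alt, slice16]
  have hA := csLoop_iff wl [(x - 1, y), (x + 1, y), (x, y - 1), (x, y + 1)] (by
    intro p hp
    simp only [List.mem_cons, List.not_mem_nil, or_false] at hp
    rcases hp with hp | hp | hp | hp <;> subst hp
    · exact hp1
    · exact hp2
    · exact hp3
    · exact hp4)
  rw [Bool.eq_iff_iff]
  rw [show check_stench (x, y) wl =
      csLoop wl [(x - 1, y), (x + 1, y), (x, y - 1), (x, y + 1)] from rfl]
  rw [hA, hB, altLoop_iff x y (wl.take 16) 0]
  constructor
  · rintro ⟨p, hp, hg, hval⟩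
    have hjlen : ((p.1 * 4 + p.2).toNat : Nat) < wl.length := by
      simp only [List.mem_cons, List.not_mem_nil, or_false] at hp
      rcases hp with hp | hp | hp | hp <;> subst hp
      · exact hp1 hg
      · exact hp2 hg
      · exact hp3 hg
      · exact hp4 hg
    refine ⟨(p.1 * 4 + p.2).toNat, by simp [List.length_take]; omega, ?_, ?_⟩
    · rw [List.getD_eq_getElem?_getD, List.getElem?_take_of_lt (by omega),
        ← List.getD_eq_getElem?_getD]
      exact hval
    · simp only [List.mem_cons, List.not_mem_nil, or_false] at hp
      rcases hp with hp | hp | hp | hp <;> subst hp <;> omega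
  · rintro ⟨j, hj, hval, hdist⟩
    have hj16 : j < 16 := by simp [List.length_take] at hj; omega
    have hjlen : j < wl.length := by simp [List.length_take] at hj; omega
    have hval' : wl.getD j false = true := by
      rw [List.getD_eq_getElem?_getD, List.getElem?_take_of_lt hj16,
        ← List.getD_eq_getElem?_getD] at hval
      exact hval
    simp only [Nat.zero_add] at hdist
    have hcases : (x - 1 = ((j / 4 : Nat) : Int) ∧ y = ((j % 4 : Nat) : Int)) ∨
        (x + 1 = ((j / 4 : Nat) : Int) ∧ y = ((j % 4 : Nat) : Int)) ∨
        (x = ((j / 4 : Nat) : Int) ∧ y - 1 = ((j % 4 : Nat) : Int)) ∨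
        (x = ((j / 4 : Nat) : Int) ∧ y + 1 = ((j % 4 : Nat) : Int)) := by omega
    rcases hcases with ⟨h1, h2⟩ | ⟨h1, h2⟩ | ⟨h1, h2⟩ | ⟨h1, h2⟩
    · refine ⟨(x - 1, y), by simp, ⟨by omega, by omega, by omega, by omega⟩, ?_⟩
      have heq : ((x - 1) * 4 + y).toNat = j := by omega
      simpa [heq] using hval'
    · refine ⟨(x + 1, y), by simp, ⟨by omega, by omega, by omega, by omega⟩, ?_⟩
      have heq : ((x + 1) * 4 + y).toNat = j := by omega
      simpa [heq] using hval'
    · refine ⟨(x, y - 1), by simp, ⟨by omega, by omega, by omega, by omega⟩, ?_⟩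
      have heq : (x * 4 + (y - 1)).toNat = j := by omega
      simpa [heq] using hval'
    · refine ⟨(x, y + 1), by simp, ⟨by omega, by omega, by omega, by omega⟩, ?_⟩
      have heq : (x * 4 + (y + 1)).toNat = j := by omega
      simpa [heq] using hval'

-- ===== VERDICT (by name: the statement is the Claim_ definition above) =====
theorem check_stench_spec : Claim_equal_check_stench := by
  intro agent_pos wumpusLocation _ hpre
  unfold Spec_check_stench
  exact check_stench_spec' agent_pos wumpusLocation hpre
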